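-- pv_equiv track=rewrite | github.com/redhat-documentation/redhat-docs-agent-tools | plugins/cqa-tools/skills/cqa-assess/scripts/check-external-links.py | categorize_domain
-- ===== SOURCE A (Python) =====
-- RH_DOMAINS = {
--     "access.redhat.com",
--     "redhat.com",
--     "www.redhat.com",
--     "docs.redhat.com",
--     "catalog.redhat.com",
--     "console.redhat.com",
--     "developers.redhat.com",
--     "issues.redhat.com",
--     "connect.redhat.com",
--     "sso.redhat.com",
--     "registry.redhat.io",
--     "quay.io",  # Red Hat owned
--     "red.ht",  # Red Hat URL shortener
--     "docs.openshift.com",  # OpenShift documentation (Red Hat product)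
--     "workspaces.openshift.com",  # Red Hat Dev Spaces hosted service
-- }
--
-- UPSTREAM_DOMAINS = {
--     "github.com",
--     "eclipse.org",
--     "www.eclipse.org",
--     "kubernetes.io",
--     "devfile.io",
--     "che.eclipse.org",
-- }
--
-- AUTHORITATIVE_DOMAINS = {
--     "docs.github.com",
--     "kubernetes.io",
--     "docs.docker.com",
--     "www.jetbrains.com",
--     "plugins.jetbrains.com",
--     "code.visualstudio.com",
--     "marketplace.visualstudio.com",
--     "docs.microsoft.com",
--     "learn.microsoft.com",
--     "tools.ietf.org",
--     "www.rfc-editor.org",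
--     "yaml.org",
--     "www.yaml.org",
--     "json-schema.org",
--     "semver.org",
--     "oauth.net",
--     "openid.net",
--     "www.openapis.org",
-- }
--
-- def categorize_domain(domain):
--     """Categorize a domain as RH, upstream, authoritative, or third-party."""
--     # Check exact match first
--     if domain in RH_DOMAINS:
--         return "Red Hat"
--
--     # Check if subdomain of a Red Hat domain
--     for rh in RH_DOMAINS:
--         if domain.endswith("." + rh):
--             return "Red Hat"
--
--     if domain in UPSTREAM_DOMAINS:
--         return "Upstream/Community"
--     for up in UPSTREAM_DOMAINS:
--         if domain.endswith("." + up):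
--             return "Upstream/Community"
--
--     if domain in AUTHORITATIVE_DOMAINS:
--         return "Authoritative"
--     for auth in AUTHORITATIVE_DOMAINS:
--         if domain.endswith("." + auth):
--             return "Authoritative"
--
--     return "Third-party"
-- ===== SOURCE B (Python) =====
-- RH_DOMAINS = {
--     "access.redhat.com",
--     "redhat.com",
--     "www.redhat.com",
--     "docs.redhat.com",
--     "catalog.redhat.com",
--     "console.redhat.com",
--     "developers.redhat.com",
--     "issues.redhat.com",
--     "connect.redhat.com",
--     "sso.redhat.com",
--     "registry.redhat.io",
--     "quay.io",
--     "red.ht",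
--     "docs.openshift.com",
--     "workspaces.openshift.com",
-- }
--
-- UPSTREAM_DOMAINS = {
--     "github.com",
--     "eclipse.org",
--     "www.eclipse.org",
--     "kubernetes.io",
--     "devfile.io",
--     "che.eclipse.org",
-- }
--
-- AUTHORITATIVE_DOMAINS = {
--     "docs.github.com",
--     "kubernetes.io",
--     "docs.docker.com",
--     "www.jetbrains.com",
--     "plugins.jetbrains.com",
--     "code.visualstudio.com",
--     "marketplace.visualstudio.com",
--     "docs.microsoft.com",
--     "learn.microsoft.com",
--     "tools.ietf.org",
--     "www.rfc-editor.org",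
--     "yaml.org",
--     "www.yaml.org",
--     "json-schema.org",
--     "semver.org",
--     "oauth.net",
--     "openid.net",
--     "www.openapis.org",
-- }
--
--
-- def categorize_domain(domain):
--     """Categorize a domain as RH, upstream, authoritative, or third-party."""
--     # Candidate suffixes of the domain on dot boundaries (longest first).
--     suffixes = [domain]
--     for i, ch in enumerate(domain):
--         if ch == ".":
--             suffixes.append(domain[i + 1:])
--     # First category owning any suffix wins.
--     for cat, label in ((RH_DOMAINS, "Red Hat"),
--                        (UPSTREAM_DOMAINS, "Upstream/Community"),
--                        (AUTHORITATIVE_DOMAINS, "Authoritative")):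
--         if any(s in cat for s in suffixes):
--             return label
--     return "Third-party"
-- ===== Notes on version B (the rewrite author's own statement) =====
-- stated objective: alternative
-- what changed: B enumerates the domain's own dot-boundary suffixes once and checks each candidate against the category sets in priority order, instead of A's per-category scans over every set member calling endswith.
import Mathlib
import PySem

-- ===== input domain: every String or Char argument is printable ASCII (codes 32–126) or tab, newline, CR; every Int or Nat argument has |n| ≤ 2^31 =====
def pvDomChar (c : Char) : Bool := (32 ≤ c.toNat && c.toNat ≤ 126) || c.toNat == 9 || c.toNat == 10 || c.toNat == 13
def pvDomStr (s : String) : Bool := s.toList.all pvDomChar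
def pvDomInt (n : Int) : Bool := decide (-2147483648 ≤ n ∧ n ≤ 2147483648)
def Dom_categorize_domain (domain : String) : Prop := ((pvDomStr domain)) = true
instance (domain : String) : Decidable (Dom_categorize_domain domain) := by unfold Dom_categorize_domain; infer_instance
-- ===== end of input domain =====

-- B classifies a domain by enumerating its own dot-boundary suffixes and looking each up
-- in the category sets in priority order, instead of A's per-category endswith scans (alternative).


-- ===== PORT A =====
-- Module constants (Python sets of strings); shared by both ports as in the Python sources.
def RH_DOMAINS : PySem.Set String := PySem.Set.ofList
  ["access.redhat.com", "redhat.com", "www.redhat.com", "docs.redhat.com",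
   "catalog.redhat.com", "console.redhat.com", "developers.redhat.com",
   "issues.redhat.com", "connect.redhat.com", "sso.redhat.com",
   "registry.redhat.io", "quay.io", "red.ht", "docs.openshift.com",
   "workspaces.openshift.com"]

def UPSTREAM_DOMAINS : PySem.Set String := PySem.Set.ofList
  ["github.com", "eclipse.org", "www.eclipse.org", "kubernetes.io",
   "devfile.io", "che.eclipse.org"]

def AUTHORITATIVE_DOMAINS : PySem.Set String := PySem.Set.ofList
  ["docs.github.com", "kubernetes.io", "docs.docker.com", "www.jetbrains.com",
   "plugins.jetbrains.com", "code.visualstudio.com", "marketplace.visualstudio.com",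
   "docs.microsoft.com", "learn.microsoft.com", "tools.ietf.org",
   "www.rfc-editor.org", "yaml.org", "www.yaml.org", "json-schema.org",
   "semver.org", "oauth.net", "openid.net", "www.openapis.org"]

-- "domain.endswith('.' + x)": '.' + x is the char '.' consed onto x; exact via PySem.Chars.endswith.
def endsWithDot (domain : String) (x : String) : Bool :=
  PySem.Chars.endswith domain.toList ('.' :: x.toList)

-- 'for x in SET: if domain.endswith('.' + x): return label' — the loop's outcome (whether any
-- member matches) is independent of Python's set iteration order, ported as List.any.
def categorize_domain (domain : String) : String :=
  if RH_DOMAINS.contains domain then "Red Hat"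
  else if RH_DOMAINS.any (fun rh => endsWithDot domain rh) then "Red Hat"
  else if UPSTREAM_DOMAINS.contains domain then "Upstream/Community"
  else if UPSTREAM_DOMAINS.any (fun up => endsWithDot domain up) then "Upstream/Community"
  else if AUTHORITATIVE_DOMAINS.contains domain then "Authoritative"
  else if AUTHORITATIVE_DOMAINS.any (fun auth => endsWithDot domain auth) then "Authoritative"
  else "Third-party"

-- ===== PORT B =====
-- Source B's suffix-collecting loop: for each '.' at position i, append domain[i+1:].
def dottedTails : List Char → List (List Char)
  | [] => []
  | c :: rest => if c = '.' then rest :: dottedTails rest else dottedTails rest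

-- Source B's category loop: first of the three sets owning a candidate suffix wins.
def pickCategory (suffixes : List String) : String :=
  if suffixes.any (fun s => RH_DOMAINS.contains s) then "Red Hat"
  else if suffixes.any (fun s => UPSTREAM_DOMAINS.contains s) then "Upstream/Community"
  else if suffixes.any (fun s => AUTHORITATIVE_DOMAINS.contains s) then "Authoritative"
  else "Third-party"

def categorize_domain_alt (domain : String) : String :=
  pickCategory (domain :: (dottedTails domain.toList).map String.ofList)

-- ===== PRECONDITION & SPEC =====
def Spec_categorize_domain (domain : String) (out : String) : Prop := out = categorize_domain_alt domain
instance (domain : String) (out : String) : Decidable (Spec_categorize_domain domain out) := by unfold Spec_categorize_domain; infer_instance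

-- ===== CLAIM (what is proved, stated in full; the proofs are below) =====
def Claim_equal_categorize_domain : Prop := ∀ (domain : String), Dom_categorize_domain domain → Spec_categorize_domain domain (categorize_domain domain)

-- ===== LEMMAS AND PROOFS =====

theorem setContains_iff (L : PySem.Set String) (x : String) :
    PySem.Set.contains L x = true ↔ x ∈ L := List.contains_iff_mem

theorem mem_dottedTails {d s : List Char} :
    s ∈ dottedTails d ↔ ∃ p, d = p ++ '.' :: s := by
  induction d with
  | nil => simp [dottedTails]
  | cons c rest ih =>
    simp only [dottedTails]
    constructor
    · intro h
      by_cases hc : c = '.'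
      · simp [hc] at h
        rcases h with h | h
        · exact ⟨[], by simp [hc, h]⟩
        · rcases ih.mp h with ⟨p, hp⟩
          exact ⟨c :: p, by simp [hp]⟩
      · simp [hc] at h
        rcases ih.mp h with ⟨p, hp⟩
        exact ⟨c :: p, by simp [hp]⟩
    · rintro ⟨p, hp⟩
      cases p with
      | nil =>
        simp at hp
        simp [hp.1, hp.2]
      | cons q qs =>
        simp at hp
        have : s ∈ dottedTails rest := ih.mpr ⟨qs, hp.2⟩
        split <;> simp [this]

-- One category: A's "exact match OR some set member matches by endswith('.'+x)" equals
-- B's "some dot-boundary suffix of the domain is a set member".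
theorem category_eq (domain : String) (L : PySem.Set String) :
    (PySem.Set.contains L domain || L.any (fun x => endsWithDot domain x)) =
      ((domain :: (dottedTails domain.toList).map String.ofList).any
        (fun s => PySem.Set.contains L s)) := by
  rw [Bool.eq_iff_iff]
  simp only [endsWithDot, Bool.or_eq_true, List.any_cons, List.any_eq_true, List.mem_map,
    setContains_iff, PySem.Chars.endswith_iff]
  constructor
  · rintro (h | ⟨x, hx, hsuf⟩)
    · exact Or.inl h
    · obtain ⟨p, hp⟩ := hsuf
      exact Or.inr ⟨x, ⟨x.toList, mem_dottedTails.mpr ⟨p, hp.symm⟩, by simp⟩, hx⟩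
  · rintro (h | ⟨s, ⟨cs, hcs, hmk⟩, hmem⟩)
    · exact Or.inl h
    · obtain ⟨p, hp⟩ := mem_dottedTails.mp hcs
      exact Or.inr ⟨s, hmem, ⟨p, by simp [← hmk, hp]⟩⟩

theorem if_or_collapse {α : Type} (a b : Bool) (s t : α) :
    (if a then s else if b then s else t) = (if (a || b) then s else t) := by
  cases a <;> simp

-- ===== VERDICT (by name: the statement is the Claim_ definition above) =====
theorem categorize_domain_spec : Claim_equal_categorize_domain := by
  intro domain _
  unfold Spec_categorize_domain categorize_domain categorize_domain_alt pickCategory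
  rw [if_or_collapse, category_eq domain RH_DOMAINS,
      if_or_collapse, category_eq domain UPSTREAM_DOMAINS,
      if_or_collapse, category_eq domain AUTHORITATIVE_DOMAINS]
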